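-- pv_equiv track=rewrite | github.com/Olim2508/leetcode | leetcode/1385_find_the_distance_value/main.py | binary_search_sol
-- ===== SOURCE A (Python) =====
-- def binary_search_sol(arr1, arr2, d):
--     res = 0
--     arr2.sort()
--     for n1 in arr1:
--         l, r = 0, len(arr2) - 1
--         is_all = True
--         while l <= r:
--             mid = (l + r) // 2
--             if abs(arr2[mid] - n1) <= d:
--                 is_all = False
--                 break
--             elif n1 < arr2[mid]:
--                 r = mid - 1
--             else:
--                 l = mid + 1
--         if is_all:
--             res += 1
--     return res
-- ===== SOURCE B (Python) =====
-- def binary_search_sol(arr1, arr2, d):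
--     # Return-value equivalent to A; note A also sorts arr2 in place, B does not mutate.
--     return sum(1 for n1 in arr1 if all(abs(n1 - n2) > d for n2 in arr2))
-- ===== Notes on version B (the rewrite author's own statement) =====
-- stated objective: simpler
-- what changed: Replaced the sort plus per-element binary search with a direct one-line count of arr1 elements whose distance to every arr2 element exceeds d (no sort, no binary search); B does not mutate arr2 while A sorts it in place.
import Mathlib
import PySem

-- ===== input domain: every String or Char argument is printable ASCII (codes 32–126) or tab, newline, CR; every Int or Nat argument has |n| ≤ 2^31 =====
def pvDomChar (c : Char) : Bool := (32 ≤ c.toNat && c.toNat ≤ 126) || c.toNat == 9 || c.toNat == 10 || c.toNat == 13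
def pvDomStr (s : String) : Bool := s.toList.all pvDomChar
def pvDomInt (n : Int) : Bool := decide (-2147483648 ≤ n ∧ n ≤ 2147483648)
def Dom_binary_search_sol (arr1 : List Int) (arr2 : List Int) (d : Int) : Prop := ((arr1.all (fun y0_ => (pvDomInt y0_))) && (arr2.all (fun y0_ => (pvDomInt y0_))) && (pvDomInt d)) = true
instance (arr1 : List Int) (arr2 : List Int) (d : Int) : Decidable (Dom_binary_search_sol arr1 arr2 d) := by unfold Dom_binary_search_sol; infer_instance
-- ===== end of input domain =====

-- B replaces A's sort + per-element binary search by a direct count of arr1 elements with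
-- every arr2 element farther than d (objective: simpler). Return-value equivalence only:
-- A sorts arr2 in place, B does not mutate its arguments.

-- ===== PORT A =====
-- the inner 'while l <= r' binary-search loop of A; returns is_all
def bsLoop (s : List Int) (n1 d l r : Int) : Bool :=
  -- mid = (l + r) // 2 is inlined at its three uses
  if _h : l ≤ r then
    match PySem.List.pyGet? s (PySem.Int.floordiv (l + r) 2) with
    | none => true   -- unreachable in A's calls (0 ≤ l ≤ mid ≤ r < len)
    | some v =>
      if |v - n1| ≤ d then false
      else if n1 < v then bsLoop s n1 d l (PySem.Int.floordiv (l + r) 2 - 1)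
      else bsLoop s n1 d (PySem.Int.floordiv (l + r) 2 + 1) r
  else true
termination_by (r + 1 - l).toNat
decreasing_by
  · have := PySem.Int.floordiv_two_mid_bounds _h
    omega
  · have := PySem.Int.floordiv_two_mid_bounds _h
    omega

def binary_search_sol (arr1 : List Int) (arr2 : List Int) (d : Int) : Int :=
  let s := PySem.List.sorted arr2 (fun x => x) false
  arr1.foldl (fun res n1 => if bsLoop s n1 d 0 ((s.length : Int) - 1) then res + 1 else res) 0

-- ===== PORT B =====
def binary_search_sol_alt (arr1 : List Int) (arr2 : List Int) (d : Int) : Int :=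
  ((arr1.countP (fun n1 => arr2.all (fun n2 => decide (d < |n1 - n2|)))) : Int)

-- ===== PRECONDITION & SPEC =====
def Spec_binary_search_sol (arr1 : List Int) (arr2 : List Int) (d : Int) (out : Int) : Prop := out = binary_search_sol_alt arr1 arr2 d
instance (arr1 : List Int) (arr2 : List Int) (d : Int) (out : Int) : Decidable (Spec_binary_search_sol arr1 arr2 d out) := by unfold Spec_binary_search_sol; infer_instance

-- ===== CLAIM (what is proved, stated in full; the proofs are below) =====
def Claim_equal_binary_search_sol : Prop := ∀ (arr1 : List Int) (arr2 : List Int) (d : Int), Dom_binary_search_sol arr1 arr2 d → Spec_binary_search_sol arr1 arr2 d (binary_search_sol arr1 arr2 d)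

-- ===== LEMMAS AND PROOFS =====

-- if the loop reports False (found), some element of s is within d of n1
theorem bsLoop_false_sound (s : List Int) (n1 d : Int) :
    ∀ l r, bsLoop s n1 d l r = false → ∃ v ∈ s, |v - n1| ≤ d := by
  intro l r
  generalize hn : (r + 1 - l).toNat = n
  induction n using Nat.strong_induction_on generalizing l r with
  | _ n ih =>
  intro hc
  rw [bsLoop] at hc
  by_cases h : l ≤ r
  · have hb := PySem.Int.floordiv_two_mid_bounds h
    rw [dif_pos h] at hc
    cases hg : PySem.List.pyGet? s (PySem.Int.floordiv (l + r) 2) with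
    | none => simp only [hg] at hc; exact Bool.noConfusion hc
    | some v =>
      simp only [hg] at hc
      by_cases h1 : |v - n1| ≤ d
      · exact ⟨v, PySem.List.mem_of_pyGet?_eq_some s hg, h1⟩
      · rw [if_neg h1] at hc
        by_cases h2 : n1 < v
        · rw [if_pos h2] at hc
          exact ih _ (by omega) l _ rfl hc
        · rw [if_neg h2] at hc
          exact ih _ (by omega) _ r rfl hc
  · rw [dif_neg h] at hc; simp at hc

-- on a sorted list, if some index in [l,r] is within d of n1, the loop reports False
theorem bsLoop_complete (s : List Int) (n1 d : Int) (hs : s.Pairwise (· ≤ ·)) :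
    ∀ l r, 0 ≤ l → r < (s.length : Int) →
      ∀ (i : Nat) (hi : i < s.length), l ≤ (i : Int) → (i : Int) ≤ r →
      |s[i] - n1| ≤ d → bsLoop s n1 d l r = false := by
  have mono : ∀ (p q : Nat) (hpq : p ≤ q) (hq : q < s.length), s[p]'(by omega) ≤ s[q] := by
    intro p q hpq hq
    rcases Nat.eq_or_lt_of_le hpq with h | h
    · subst h; rfl
    · exact List.pairwise_iff_getElem.mp hs p q (by omega) hq h
  intro l r
  generalize hn : (r + 1 - l).toNat = n
  induction n using Nat.strong_induction_on generalizing l r with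
  | _ n ih =>
  intro hl0 hrlen i hi hli hir hwit
  have h : l ≤ r := by omega
  have hb := PySem.Int.floordiv_two_mid_bounds h
  have hmid0 : (0:Int) ≤ PySem.Int.floordiv (l + r) 2 := by omega
  have hmlen : PySem.Int.floordiv (l + r) 2 < (s.length : Int) := by omega
  have hget : PySem.List.pyGet? s (PySem.Int.floordiv (l + r) 2)
      = some (s[(PySem.Int.floordiv (l + r) 2).toNat]'(by omega)) :=
    PySem.List.pyGet?_eq_some_getElem s hmid0 hmlen
  rw [bsLoop, dif_pos h]
  simp only [hget]
  by_cases h1 : |s[(PySem.Int.floordiv (l + r) 2).toNat]'(by omega) - n1| ≤ d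
  · rw [if_pos h1]
  · rw [if_neg h1]
    by_cases h2 : n1 < s[(PySem.Int.floordiv (l + r) 2).toNat]'(by omega)
    · rw [if_pos h2]
      -- the witness index lies strictly below mid: above mid everything exceeds n1 + d
      have hilt : (i : Int) ≤ PySem.Int.floordiv (l + r) 2 - 1 := by
        by_contra hcon
        have hms := mono (PySem.Int.floordiv (l + r) 2).toNat i (by omega) hi
        have e1 : |s[i] - n1| = s[i] - n1 := abs_of_nonneg (by omega)
        have e2 : |s[(PySem.Int.floordiv (l + r) 2).toNat]'(by omega) - n1|
            = s[(PySem.Int.floordiv (l + r) 2).toNat]'(by omega) - n1 := abs_of_nonneg (by omega)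
        omega
      exact ih _ (by omega) l _ rfl hl0 (by omega) i hi hli hilt hwit
    · rw [if_neg h2]
      -- the witness index lies strictly above mid: below mid everything is under n1 - d
      have hilt : PySem.Int.floordiv (l + r) 2 + 1 ≤ (i : Int) := by
        by_contra hcon
        have hms := mono i (PySem.Int.floordiv (l + r) 2).toNat (by omega) (by omega)
        have e1 : |s[i] - n1| = -(s[i] - n1) := abs_of_nonpos (by omega)
        have e2 : |s[(PySem.Int.floordiv (l + r) 2).toNat]'(by omega) - n1|
            = -(s[(PySem.Int.floordiv (l + r) 2).toNat]'(by omega) - n1) := abs_of_nonpos (by omega)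
        omega
      exact ih _ (by omega) _ r rfl (by omega) hrlen i hi hilt hir hwit

-- the loop over the whole sorted list decides “every element of s is farther than d”
theorem bsLoop_iff_all (s : List Int) (n1 d : Int) (hs : s.Pairwise (· ≤ ·)) :
    bsLoop s n1 d 0 ((s.length : Int) - 1) = (s.all fun v => decide (d < |n1 - v|)) := by
  by_cases hall : ∀ v ∈ s, d < |n1 - v|
  · have : bsLoop s n1 d 0 ((s.length : Int) - 1) = true := by
      by_contra hc
      obtain ⟨v, hv, hvd⟩ := bsLoop_false_sound s n1 d 0 ((s.length : Int) - 1)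
        (by revert hc; cases bsLoop s n1 d 0 ((s.length : Int) - 1) <;> simp)
      have := hall v hv
      rw [abs_sub_comm] at hvd
      omega
    simp [this]
    intro v hv; exact hall v hv
  · push Not at hall
    obtain ⟨v, hv, hvd⟩ := hall
    obtain ⟨i, hi, rfl⟩ := List.mem_iff_getElem.mp hv
    have : bsLoop s n1 d 0 ((s.length : Int) - 1) = false :=
      bsLoop_complete s n1 d hs 0 ((s.length : Int) - 1) (by omega) (by omega) i hi (by omega) (by omega)
        (by rw [abs_sub_comm]; omega)
    rw [this]
    symm
    simp [List.all_eq_true]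
    exact ⟨s[i], hv, by omega⟩

theorem foldl_count (p : Int → Bool) (xs : List Int) (init : Int) :
    xs.foldl (fun res n1 => if p n1 then res + 1 else res) init
      = init + (xs.countP p : Int) := by
  induction xs generalizing init with
  | nil => simp
  | cons x xs ih =>
    simp only [List.foldl_cons, List.countP_cons, ih]
    by_cases hp : p x <;> simp [hp] <;> ring

-- ===== VERDICT (by name: the statement is the Claim_ definition above) =====
theorem binary_search_sol_spec : Claim_equal_binary_search_sol := by
  intro arr1 arr2 d _
  unfold Spec_binary_search_sol binary_search_sol binary_search_sol_alt
  set s := PySem.List.sorted arr2 (fun x => x) false with hsdef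
  have hs : s.Pairwise (· ≤ ·) := PySem.List.sorted_pairwise arr2 (fun x => x)
  rw [foldl_count]
  rw [show (0 : Int) + _ = _ from zero_add _]
  congr 1
  apply List.countP_congr
  intro n1 _
  rw [bsLoop_iff_all s n1 d hs]
  simp only [List.all_eq_true, decide_eq_true_eq]
  constructor
  · intro hall n2 hn2
    exact hall n2 ((PySem.List.mem_sorted _ _ _ _).mpr hn2)
  · intro hall v hv
    exact hall v ((PySem.List.mem_sorted _ _ _ _).mp hv)
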